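-- pv_equiv track=rewrite | github.com/BilalZafar37/Sales-Pulse | blueprints/sell_out_blueprint/sell_out.py | _merge_items_preferring_mapping
-- ===== SOURCE A (Python) =====
-- def _merge_items_preferring_mapping(mapping_items, sellin_items, soh_items):
--     """
--     Return a unified list of dicts (SKU_ID, ArticleCode, CustSKUCode),
--     preferring 'mapping_items' values for duplicates by ArticleCode.
--     """
--     by_article = {}
--
--     # 1) mapping first (authoritative)
--     for it in mapping_items or []:
--         ac = (it.get("ArticleCode") or "").strip()
--         if not ac:
--             continue
--         by_article[ac] = {"SKU_ID": it.get("SKU_ID"),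
--                           "ArticleCode": ac,
--                           "CustSKUCode": it.get("CustSKUCode")}
--
--     # 2) then sell-in: add only if not present
--     for it in sellin_items or []:
--         ac = (it.get("ArticleCode") or "").strip()
--         if not ac or ac in by_article:
--             continue
--         by_article[ac] = {"SKU_ID": it.get("SKU_ID"),
--                           "ArticleCode": ac,
--                           "CustSKUCode": it.get("CustSKUCode")}
--
--     # 3) then SOH: add only if not present
--     for it in soh_items or []:
--         ac = (it.get("ArticleCode") or "").strip()
--         if not ac or ac in by_article:
--             continue
--         by_article[ac] = {"SKU_ID": it.get("SKU_ID"),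
--                           "ArticleCode": ac,
--                           "CustSKUCode": it.get("CustSKUCode")}
--
--     # stable order by ArticleCode
--     merged = [by_article[k] for k in sorted(by_article.keys())]
--     return merged
-- ===== SOURCE B (Python) =====
-- def _merge_items_preferring_mapping(mapping_items, sellin_items, soh_items):
--     """
--     Same merge, built by last-wins overwrites in reverse priority order:
--     SOH and sell-in are written reversed (so their FIRST occurrence survives),
--     mapping is written forward last (so its LAST occurrence overrides all).
--     """
--     def overwrite(acc, items):
--         for it in items:
--             ac = (it.get("ArticleCode") or "").strip()
--             if ac:
--                 acc[ac] = {"SKU_ID": it.get("SKU_ID"),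
--                            "ArticleCode": ac,
--                            "CustSKUCode": it.get("CustSKUCode")}
--         return acc
--
--     by_article = overwrite({}, reversed(soh_items or []))
--     by_article = overwrite(by_article, reversed(sellin_items or []))
--     by_article = overwrite(by_article, mapping_items or [])
--     return [by_article[k] for k in sorted(by_article)]
-- ===== Notes on version B (the rewrite author's own statement) =====
-- stated objective: alternative
-- what changed: Replaces A's three guarded first-wins loops (membership test before each insert) by unconditional last-wins overwrites applied in reverse priority order (SOH reversed, then sell-in reversed, then mapping forward), via one shared overwrite pass.
import Mathlib
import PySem

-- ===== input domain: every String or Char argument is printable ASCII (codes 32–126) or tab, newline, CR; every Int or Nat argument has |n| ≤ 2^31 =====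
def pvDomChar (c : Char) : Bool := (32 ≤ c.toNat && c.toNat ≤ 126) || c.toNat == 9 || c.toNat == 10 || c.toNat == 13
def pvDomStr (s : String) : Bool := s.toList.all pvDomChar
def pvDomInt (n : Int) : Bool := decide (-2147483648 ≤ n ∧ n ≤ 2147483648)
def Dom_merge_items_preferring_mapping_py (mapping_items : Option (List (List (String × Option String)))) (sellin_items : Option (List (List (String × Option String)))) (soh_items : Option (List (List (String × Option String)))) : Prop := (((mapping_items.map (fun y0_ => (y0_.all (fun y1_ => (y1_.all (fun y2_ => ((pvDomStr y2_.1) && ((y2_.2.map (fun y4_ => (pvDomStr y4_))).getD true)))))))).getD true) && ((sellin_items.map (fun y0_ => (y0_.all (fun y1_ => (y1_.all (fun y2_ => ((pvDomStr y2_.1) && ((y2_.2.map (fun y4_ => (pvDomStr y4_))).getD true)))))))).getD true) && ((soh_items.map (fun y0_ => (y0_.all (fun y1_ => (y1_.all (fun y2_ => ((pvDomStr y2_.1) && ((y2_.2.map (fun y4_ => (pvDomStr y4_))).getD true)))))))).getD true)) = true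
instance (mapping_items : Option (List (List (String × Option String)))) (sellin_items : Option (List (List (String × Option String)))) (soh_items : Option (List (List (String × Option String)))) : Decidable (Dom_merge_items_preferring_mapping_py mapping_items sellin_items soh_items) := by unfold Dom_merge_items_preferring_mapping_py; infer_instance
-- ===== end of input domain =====

-- ===== PORT A =====
-- B differs by building the dict with unconditional last-wins overwrites in reverse priority order (alternative decomposition; same cost).
-- Python dict.get on an item dict (assoc list, first-match lookup); missing key -> None
def pvGet (it : List (String × Option String)) (k : String) : Option String :=
  ((PySem.Dict.mk it).get? k).getD none

def merge_items_preferring_mapping_py (mapping_items : Option (List (List (String × Option String)))) (sellin_items : Option (List (List (String × Option String)))) (soh_items : Option (List (List (String × Option String)))) : List (List (String × Option String)) :=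
  -- by_article = {}
  let d0 : PySem.Dict String (List (String × Option String)) := PySem.Dict.empty
  -- 1) mapping first (authoritative): unconditional assignment
  let d1 := (mapping_items.getD []).foldl (fun d it =>
    let ac := PySem.Str.strip ((pvGet it "ArticleCode").getD "")
    if ac = "" then d
    else d.insert ac [("SKU_ID", pvGet it "SKU_ID"), ("ArticleCode", some ac), ("CustSKUCode", pvGet it "CustSKUCode")]) d0
  -- 2) then sell-in: add only if not present
  let d2 := (sellin_items.getD []).foldl (fun d it =>
    let ac := PySem.Str.strip ((pvGet it "ArticleCode").getD "")
    if ac = "" ∨ d.contains ac = true then d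
    else d.insert ac [("SKU_ID", pvGet it "SKU_ID"), ("ArticleCode", some ac), ("CustSKUCode", pvGet it "CustSKUCode")]) d1
  -- 3) then SOH: add only if not present
  let d3 := (soh_items.getD []).foldl (fun d it =>
    let ac := PySem.Str.strip ((pvGet it "ArticleCode").getD "")
    if ac = "" ∨ d.contains ac = true then d
    else d.insert ac [("SKU_ID", pvGet it "SKU_ID"), ("ArticleCode", some ac), ("CustSKUCode", pvGet it "CustSKUCode")]) d2
  -- stable order by ArticleCode
  (PySem.List.sorted d3.keys (fun k => k) false).map (fun k => d3.getD k [])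

-- ===== PORT B =====
-- overwrite(acc, items): unconditional last-wins assignment of each non-empty ArticleCode
def pvOverwrite (acc : PySem.Dict String (List (String × Option String))) (items : List (List (String × Option String))) : PySem.Dict String (List (String × Option String)) :=
  items.foldl (fun acc it =>
    let ac := PySem.Str.strip ((pvGet it "ArticleCode").getD "")
    if ac = "" then acc
    else acc.insert ac [("SKU_ID", pvGet it "SKU_ID"), ("ArticleCode", some ac), ("CustSKUCode", pvGet it "CustSKUCode")]) acc

def merge_items_preferring_mapping_py_alt (mapping_items : Option (List (List (String × Option String)))) (sellin_items : Option (List (List (String × Option String)))) (soh_items : Option (List (List (String × Option String)))) : List (List (String × Option String)) :=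
  let b1 := pvOverwrite PySem.Dict.empty (soh_items.getD []).reverse
  let b2 := pvOverwrite b1 (sellin_items.getD []).reverse
  let b3 := pvOverwrite b2 (mapping_items.getD [])
  (PySem.List.sorted b3.keys (fun k => k) false).map (fun k => b3.getD k [])

-- ===== PRECONDITION & SPEC =====
def Spec_merge_items_preferring_mapping_py (mapping_items : Option (List (List (String × Option String)))) (sellin_items : Option (List (List (String × Option String)))) (soh_items : Option (List (List (String × Option String)))) (out : List (List (String × Option String))) : Prop := out = merge_items_preferring_mapping_py_alt mapping_items sellin_items soh_items
instance (mapping_items : Option (List (List (String × Option String)))) (sellin_items : Option (List (List (String × Option String)))) (soh_items : Option (List (List (String × Option String)))) (out : List (List (String × Option String))) : Decidable (Spec_merge_items_preferring_mapping_py mapping_items sellin_items soh_items out) := by unfold Spec_merge_items_preferring_mapping_py; infer_instance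

-- ===== CLAIM (what is proved, stated in full; the proofs are below) =====
def Claim_equal_merge_items_preferring_mapping_py : Prop := ∀ (mapping_items : Option (List (List (String × Option String)))) (sellin_items : Option (List (List (String × Option String)))) (soh_items : Option (List (List (String × Option String)))), Dom_merge_items_preferring_mapping_py mapping_items sellin_items soh_items → Spec_merge_items_preferring_mapping_py mapping_items sellin_items soh_items (merge_items_preferring_mapping_py mapping_items sellin_items soh_items)

-- ===== LEMMAS AND PROOFS =====

-- abbreviations for the proofs: the stripped ArticleCode and the produced row
def pvAc (it : List (String × Option String)) : String :=
  PySem.Str.strip ((pvGet it "ArticleCode").getD "")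
def pvRow (it : List (String × Option String)) : List (String × Option String) :=
  [("SKU_ID", pvGet it "SKU_ID"), ("ArticleCode", some (pvAc it)), ("CustSKUCode", pvGet it "CustSKUCode")]
-- the first item of l whose stripped code is k, as a row
def pvFirst (l : List (List (String × Option String))) (k : String) : Option (List (String × Option String)) :=
  (l.find? (fun it => pvAc it == k)).map pvRow

-- the two loop bodies, as named step functions (definitionally equal to the ports' inline lambdas)
def pvStep (d : PySem.Dict String (List (String × Option String))) (it : List (String × Option String)) : PySem.Dict String (List (String × Option String)) :=
  if pvAc it = "" then d else d.insert (pvAc it) (pvRow it)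
def pvGStep (d : PySem.Dict String (List (String × Option String))) (it : List (String × Option String)) : PySem.Dict String (List (String × Option String)) :=
  if pvAc it = "" ∨ d.contains (pvAc it) = true then d else d.insert (pvAc it) (pvRow it)
def pvOut (d : PySem.Dict String (List (String × Option String))) : List (List (String × Option String)) :=
  (PySem.List.sorted d.keys (fun k => k) false).map (fun k => d.getD k [])

-- a reversed overwrite fold looks up to the FIRST matching item, else falls back to the accumulator
lemma pvStep_rev_get? (l : List (List (String × Option String))) (d : PySem.Dict String (List (String × Option String))) (k : String) (hk : k ≠ "") :
    (l.reverse.foldl pvStep d).get? k = (pvFirst l k).or (d.get? k) := by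
  induction l generalizing d with
  | nil => simp [pvFirst]
  | cons it t ih =>
    rw [List.reverse_cons, List.foldl_append]
    by_cases h : pvAc it = k
    · simp only [List.foldl_cons, List.foldl_nil, pvStep, h, if_neg hk]
      simp [pvFirst, List.find?_cons_of_pos, h, PySem.Dict.get?_insert_self]
    · have hfind : pvFirst (it :: t) k = pvFirst t k := by
        simp [pvFirst, List.find?_cons_of_neg, h]
      rw [hfind, ← ih d]
      simp only [List.foldl_cons, List.foldl_nil, pvStep]
      split_ifs with h0
      · rfl
      · exact PySem.Dict.get?_insert_of_ne _ _ (fun hkk => h hkk.symm)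

-- the forward form: the LAST matching item (= first of the reversed list) wins
lemma pvStep_fwd_get? (l : List (List (String × Option String))) (d : PySem.Dict String (List (String × Option String))) (k : String) (hk : k ≠ "") :
    (l.foldl pvStep d).get? k = (pvFirst l.reverse k).or (d.get? k) := by
  have h := pvStep_rev_get? l.reverse d k hk
  rwa [List.reverse_reverse] at h

-- a guarded (first-wins) fold keeps the accumulator's value, else the first matching item
lemma pvGStep_get? (l : List (List (String × Option String))) (d : PySem.Dict String (List (String × Option String))) (k : String) (hk : k ≠ "") :
    (l.foldl pvGStep d).get? k = (d.get? k).or (pvFirst l k) := by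
  induction l generalizing d with
  | nil => simp [pvFirst]
  | cons it t ih =>
    rw [List.foldl_cons]
    by_cases h : pvAc it = k
    · have hfind : pvFirst (it :: t) k = some (pvRow it) := by
        simp [pvFirst, List.find?_cons_of_pos, h]
      rw [hfind]
      by_cases hc : d.contains (pvAc it) = true
      · rw [show pvGStep d it = d from if_pos (Or.inr hc)]
        rw [ih d]
        have : (d.get? k).isSome := by
          rw [← PySem.Dict.contains_eq_isSome_get?, ← h]; exact hc
        obtain ⟨v, hv⟩ := Option.isSome_iff_exists.mp this
        simp [hv, pvFirst]
      · rw [show pvGStep d it = d.insert (pvAc it) (pvRow it) from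
          if_neg (fun hor => hor.elim (fun e => hk (h ▸ e)) hc)]
        rw [ih _]
        have hnone : d.get? k = none := by
          have := PySem.Dict.contains_eq_isSome_get? (d := d) (k := k)
          rw [h] at hc
          rw [Option.eq_none_iff_forall_ne_some]
          intro v hv; rw [hv] at this; simp at this; exact hc this
        rw [h, PySem.Dict.get?_insert_self, hnone]
        simp
    · have hfind : pvFirst (it :: t) k = pvFirst t k := by
        simp [pvFirst, List.find?_cons_of_neg, h]
      rw [hfind, ih (pvGStep d it)]
      have : (pvGStep d it).get? k = d.get? k := by
        simp only [pvGStep]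
        split_ifs with h0
        · rfl
        · exact PySem.Dict.get?_insert_of_ne _ _ (fun hkk => h hkk.symm)
      rw [this]

-- the empty key is never inserted by either step
lemma pvStep_get?_empty (l : List (List (String × Option String))) (d : PySem.Dict String (List (String × Option String))) :
    (l.foldl pvStep d).get? "" = d.get? "" := by
  induction l generalizing d with
  | nil => rfl
  | cons it t ih =>
    rw [List.foldl_cons, ih]
    simp only [pvStep]
    split_ifs with h0
    · rfl
    · exact PySem.Dict.get?_insert_of_ne _ _ (fun hkk => h0 hkk.symm)

lemma pvGStep_get?_empty (l : List (List (String × Option String))) (d : PySem.Dict String (List (String × Option String))) :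
    (l.foldl pvGStep d).get? "" = d.get? "" := by
  induction l generalizing d with
  | nil => rfl
  | cons it t ih =>
    rw [List.foldl_cons, ih]
    simp only [pvGStep]
    split_ifs with h0
    · rfl
    · exact PySem.Dict.get?_insert_of_ne _ _ (fun hkk => h0 (Or.inl hkk.symm))

-- keys stay duplicate-free through both folds
lemma pvStep_nodup (l : List (List (String × Option String))) (d : PySem.Dict String (List (String × Option String))) (h : d.keys.Nodup) :
    (l.foldl pvStep d).keys.Nodup := by
  induction l generalizing d with
  | nil => exact h
  | cons it t ih =>
    rw [List.foldl_cons]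
    apply ih
    simp only [pvStep]
    split_ifs
    · exact h
    · exact PySem.Dict.nodup_keys_insert _ _ _ h

lemma pvGStep_nodup (l : List (List (String × Option String))) (d : PySem.Dict String (List (String × Option String))) (h : d.keys.Nodup) :
    (l.foldl pvGStep d).keys.Nodup := by
  induction l generalizing d with
  | nil => exact h
  | cons it t ih =>
    rw [List.foldl_cons]
    apply ih
    simp only [pvGStep]
    split_ifs
    · exact h
    · exact PySem.Dict.nodup_keys_insert _ _ _ h

-- sorting with the identity key is permutation-invariant on duplicate-free lists
lemma pv_sorted_eq {l1 l2 : List String} (hp : l1.Perm l2) (h2 : l2.Nodup) :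
    PySem.List.sorted l1 (fun k => k) false = PySem.List.sorted l2 (fun k => k) false := by
  apply PySem.List.sorted_eq_of_perm_of_pairwise_lt
  · exact (PySem.List.sorted_perm l2 (fun k => k) false).trans hp.symm
  · have hle := PySem.List.sorted_pairwise (xs := l2) (key := fun k => k)
    have hnd : (PySem.List.sorted l2 (fun k => k) false).Nodup :=
      ((PySem.List.sorted_perm l2 (fun k => k) false).symm).nodup h2
    exact (hle.and hnd).imp (fun hab => lt_of_le_of_ne hab.1 hab.2)

-- two dicts with duplicate-free keys and identical lookups render the same sorted output
lemma pvOut_eq (dA dB : PySem.Dict String (List (String × Option String)))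
    (hA : dA.keys.Nodup) (hB : dB.keys.Nodup)
    (h : ∀ k, dA.get? k = dB.get? k) : pvOut dA = pvOut dB := by
  have hperm : dA.keys.Perm dB.keys := by
    rw [List.perm_ext_iff_of_nodup hA hB]
    intro k
    rw [← PySem.Dict.contains_iff_mem_keys, ← PySem.Dict.contains_iff_mem_keys,
      PySem.Dict.contains_eq_isSome_get?, PySem.Dict.contains_eq_isSome_get?, h k]
  unfold pvOut
  rw [pv_sorted_eq hperm hB]
  apply List.map_congr_left
  intro k _
  rw [PySem.Dict.getD_eq_get?_getD, PySem.Dict.getD_eq_get?_getD, h k]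

-- ===== VERDICT =====
theorem merge_items_preferring_mapping_py_spec : Claim_equal_merge_items_preferring_mapping_py := by
  intro m s o _
  unfold Spec_merge_items_preferring_mapping_py
  have eA : merge_items_preferring_mapping_py m s o =
      pvOut ((o.getD []).foldl pvGStep ((s.getD []).foldl pvGStep ((m.getD []).foldl pvStep PySem.Dict.empty))) := rfl
  have eB : merge_items_preferring_mapping_py_alt m s o =
      pvOut ((m.getD []).foldl pvStep ((s.getD []).reverse.foldl pvStep ((o.getD []).reverse.foldl pvStep PySem.Dict.empty))) := rfl
  rw [eA, eB]
  apply pvOut_eq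
  · exact pvGStep_nodup _ _ (pvGStep_nodup _ _ (pvStep_nodup _ _ PySem.Dict.nodup_keys_empty))
  · exact pvStep_nodup _ _ (pvStep_nodup _ _ (pvStep_nodup _ _ PySem.Dict.nodup_keys_empty))
  · intro k
    by_cases hk : k = ""
    · subst hk
      rw [pvGStep_get?_empty, pvGStep_get?_empty, pvStep_get?_empty,
        pvStep_get?_empty, pvStep_get?_empty, pvStep_get?_empty]
    · rw [pvGStep_get? _ _ _ hk, pvGStep_get? _ _ _ hk, pvStep_fwd_get? _ _ _ hk,
        pvStep_fwd_get? _ _ _ hk, pvStep_rev_get? _ _ _ hk, pvStep_rev_get? _ _ _ hk]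
      simp [Option.or_assoc]
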